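-- pv_equiv track=rewrite | github.com/dhermes/advent-of-code-2019 | day16/main.py | compute_dependencies
-- ===== SOURCE A (Python) =====
-- def compute_dependencies(num_values, index, result=None):
--     if result is None:
--         result = set()
--
--     n = index + 1
--     dependency_index = n - 1
--     within_number_index = 0
--
--     while dependency_index < num_values:
--         result.add(dependency_index)
--
--         within_number_index += 1
--         dependency_index += 1
--         if within_number_index >= n:
--             within_number_index = 0
--             # Skip ``n`` zeros
--             dependency_index += n
--
--     return result
-- ===== SOURCE B (Python) =====
-- def compute_dependencies(num_values, index, result=None):
--     if result is None:
--         result = set()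
--
--     n = index + 1
--     # Closed-form membership: index i contributes a non-zero (the +1 phase of the
--     # FFT pattern) exactly when the 1-based position i+1 falls in an odd block of
--     # length n, i.e. (i + 1) // n is odd.
--     result.update(i for i in range(num_values) if (i + 1) // n % 2 == 1)
--     return result
-- ===== Notes on version B (the rewrite author's own statement) =====
-- stated objective: simpler
-- what changed: Replaces A's stateful loop (running dependency_index, per-element within_number_index counter and zero-skip branch) by a stateless closed-form membership test: i is kept iff ((i+1)//n) is odd, applied as a single filter over range(num_values).
-- outside the precondition, e.g. on compute_dependencies(3, -1, None): A returns {0, 1, 2, -1}, B raises ZeroDivisionError; on compute_dependencies(3, -2, None): A does not finish within the time limit, B returns {0, 2}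
import Mathlib
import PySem

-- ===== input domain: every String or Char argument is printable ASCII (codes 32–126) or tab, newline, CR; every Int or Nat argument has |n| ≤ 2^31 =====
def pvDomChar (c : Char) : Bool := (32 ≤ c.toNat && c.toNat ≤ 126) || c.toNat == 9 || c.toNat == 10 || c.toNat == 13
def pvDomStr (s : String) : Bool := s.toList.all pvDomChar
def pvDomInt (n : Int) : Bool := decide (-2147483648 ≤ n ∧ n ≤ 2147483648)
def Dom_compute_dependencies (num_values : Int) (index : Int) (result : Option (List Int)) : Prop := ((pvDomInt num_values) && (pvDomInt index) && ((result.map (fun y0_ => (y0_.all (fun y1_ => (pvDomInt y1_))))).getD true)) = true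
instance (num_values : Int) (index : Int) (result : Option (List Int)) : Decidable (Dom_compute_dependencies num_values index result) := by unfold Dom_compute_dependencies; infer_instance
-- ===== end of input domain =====

-- ===== PORT A =====
-- Header: B replaces A's stateful counter loop by a stateless closed-form filter
-- (i kept iff ((i+1)//n) is odd); equivalence is about the RETURN value only
-- (both Pythons also mutate a passed-in result set in the same way).

-- while loop of A: fuel bounds the number of iterations (each iteration moves
-- dependency_index forward by at least 1 whenever n ≥ 0, which Pre_ guarantees).
def aLoop (num n : Int) : Nat → Int → Int → PySem.Set Int → PySem.Set Int
  | 0, _, _, res => res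
  | fuel + 1, dep, within, res =>
    if dep < num then
      if within + 1 ≥ n then aLoop num n fuel (dep + 1 + n) 0 (PySem.Set.add res dep)
      else aLoop num n fuel (dep + 1) (within + 1) (PySem.Set.add res dep)
    else res

def compute_dependencies (num_values : Int) (index : Int) (result : Option (List Int)) : List Int :=
  let res : PySem.Set Int := match result with
    | none => PySem.Set.empty
    | some xs => PySem.Set.ofList xs
  let n := index + 1
  aLoop num_values n (num_values - (n - 1)).toNat (n - 1) 0 res

-- ===== PORT B =====
-- B: one generator expression, '(i + 1) // n % 2 == 1' per element, fed to result.update.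
def keptB (n i : Int) : Bool := PySem.Int.mod (PySem.Int.floordiv (i + 1) n) 2 == 1

def compute_dependencies_alt (num_values : Int) (index : Int) (result : Option (List Int)) : List Int :=
  let res : PySem.Set Int := match result with
    | none => PySem.Set.empty
    | some xs => PySem.Set.ofList xs
  let n := index + 1
  PySem.Set.update res ((PySem.List.pyRange 0 num_values 1).filter (fun i => keptB n i))

-- ===== PRECONDITION & SPEC =====
-- Pre_ excludes negative index with index < num_values: there A either loops forever
-- (index ≤ -2) or, for index = -1 (n = 0), returns a set containing the spurious
-- index -1 as an artefact of the degenerate block length; B raises ZeroDivisionError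
-- there (n = 0 divisor).
def Pre_compute_dependencies (num_values : Int) (index : Int) (result : Option (List Int)) : Prop :=
  0 ≤ index ∨ num_values ≤ index
instance (num_values : Int) (index : Int) (result : Option (List Int)) : Decidable (Pre_compute_dependencies num_values index result) := by unfold Pre_compute_dependencies; infer_instance

def pvWitness_compute_dependencies : Int × Int × Option (List Int) := (8, 2, none)

def Spec_compute_dependencies (num_values : Int) (index : Int) (result : Option (List Int)) (out : List Int) : Prop := out = compute_dependencies_alt num_values index result
instance (num_values : Int) (index : Int) (result : Option (List Int)) (out : List Int) : Decidable (Spec_compute_dependencies num_values index result out) := by unfold Spec_compute_dependencies; infer_instance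

-- ===== CLAIM (what is proved, stated in full; the proofs are below) =====
def Claim_equal_compute_dependencies : Prop := ∀ (num_values : Int) (index : Int) (result : Option (List Int)), Dom_compute_dependencies num_values index result → Pre_compute_dependencies num_values index result → Spec_compute_dependencies num_values index result (compute_dependencies num_values index result)

-- ===== LEMMAS AND PROOFS =====

lemma aLoop_exit (num n : Int) (fuel : Nat) (dep within : Int) (res : PySem.Set Int)
    (h : num ≤ dep) : aLoop num n fuel dep within res = res := by
  cases fuel with
  | zero => rfl
  | succ f => simp [aLoop, not_lt.mpr h]

-- i with 1-based position (2b+1)*n + w (0 ≤ w < n) lies in an odd block: kept.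
lemma keptB_true (n b w : Int) (hn : 0 < n) (_hb : 0 ≤ b) (hw : 0 ≤ w) (hw' : w < n) :
    keptB n ((2 * b + 1) * n + w - 1) = true := by
  unfold keptB
  have hq : PySem.Int.floordiv ((2 * b + 1) * n + w - 1 + 1) n = 2 * b + 1 := by
    rw [PySem.Int.floordiv_eq_iff_of_pos hn]
    constructor <;> nlinarith
  rw [hq, PySem.Int.mod_eq_emod_of_pos (by omega)]
  have : (2 * b + 1) % 2 = 1 := by omega
  simp [this]

-- i with 1-based position 2b*n + w (0 ≤ w < n) lies in an even block: not kept.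
lemma keptB_false (n b w : Int) (hn : 0 < n) (_hb : 0 ≤ b) (hw : 0 ≤ w) (hw' : w < n) :
    keptB n (2 * b * n + w - 1) = false := by
  unfold keptB
  have hq : PySem.Int.floordiv (2 * b * n + w - 1 + 1) n = 2 * b := by
    rw [PySem.Int.floordiv_eq_iff_of_pos hn]
    constructor <;> nlinarith
  rw [hq, PySem.Int.mod_eq_emod_of_pos (by omega)]
  have : (2 * b) % 2 = 0 := by omega
  simp [this]

-- Dropping a prefix [a, a+k) of rejected elements does not change the filter.
lemma filter_skip (p : Int → Bool) (num : Int) :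
    ∀ (k : Nat) (a : Int), (∀ j, a ≤ j → j < a + k → p j = false) →
      (PySem.List.pyRange a num 1).filter p = (PySem.List.pyRange (a + k) num 1).filter p := by
  intro k
  induction k with
  | zero => intro a _; simp
  | succ k ih =>
    intro a hp
    by_cases ha : a < num
    · rw [PySem.List.pyRange_one_cons ha, List.filter_cons,
        hp a le_rfl (by push_cast; omega)]
      simp only [Bool.false_eq_true, if_neg (by simp : ¬False)]
      rw [show a + ((k + 1 : Nat) : Int) = (a + 1) + (k : Int) by push_cast; ring]
      exact ih (a + 1) (fun j h1 h2 => hp j (by omega) (by push_cast at h2 ⊢; omega))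
    · rw [PySem.List.pyRange_one_eq_nil (by omega),
        PySem.List.pyRange_one_eq_nil (by push_cast; omega)]
  
-- A's loop, from a state inside an odd block (dep+1-within = (2b+1)n, 0 ≤ within < n),
-- adds exactly the kept elements of [dep, num).
lemma aLoop_eq_update (num n : Int) (hn : 1 ≤ n) :
    ∀ (fuel : Nat) (dep within : Int) (res : PySem.Set Int),
      0 ≤ within → within < n →
      (∃ b : Int, 0 ≤ b ∧ dep + 1 - within = (2 * b + 1) * n) →
      (num - dep).toNat ≤ fuel →
      aLoop num n fuel dep within res
        = PySem.Set.update res ((PySem.List.pyRange dep num 1).filter (fun i => keptB n i)) := by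
  intro fuel
  induction fuel with
  | zero =>
    intro dep within res _ _ _ hf
    rw [PySem.List.pyRange_one_eq_nil (by omega)]
    rfl
  | succ f ih =>
    intro dep within res hw0 hwn hinv hf
    obtain ⟨b, hb, hbeq⟩ := hinv
    by_cases hdep : dep < num
    · -- head element dep is kept
      have hkept : keptB n dep = true := by
        have : dep = (2 * b + 1) * n + within - 1 := by omega
        rw [this]; exact keptB_true n b within (by omega) hb hw0 hwn
      rw [PySem.List.pyRange_one_cons hdep, List.filter_cons, hkept, if_pos rfl]
      have hupd : ∀ (l : List Int),
          PySem.Set.update res (dep :: l) = PySem.Set.update (PySem.Set.add res dep) l := by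
        intro l; rfl
      rw [hupd]
      by_cases hbr : within + 1 ≥ n
      · -- end of the block: A skips n zeros; they are all rejected by keptB
        have hwtop : within = n - 1 := by omega
        simp only [aLoop, if_pos hdep, if_pos hbr]
        have hskip : (PySem.List.pyRange (dep + 1) num 1).filter (fun i => keptB n i)
            = (PySem.List.pyRange (dep + 1 + n) num 1).filter (fun i => keptB n i) := by
          have h := filter_skip (fun i => keptB n i) num n.toNat (dep + 1) ?_
          · rwa [show ((dep + 1) + (n.toNat : Int)) = dep + 1 + n by omega] at h
          · intro j h1 h2
            have hexp : 2 * (b + 1) * n = (2 * b + 1) * n + n := by ring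
            have h2' : j < dep + 1 + n := by omega
            have : j = 2 * (b + 1) * n + (j - dep - 1) - 1 := by omega
            rw [this]
            exact keptB_false n (b + 1) (j - dep - 1) (by omega) (by omega) (by omega) (by omega)
        rw [hskip]
        have hexp2 : (2 * (b + 1) + 1) * n = (2 * b + 1) * n + 2 * n := by ring
        exact ih (dep + 1 + n) 0 (PySem.Set.add res dep) le_rfl (by omega)
          ⟨b + 1, by omega, by omega⟩ (by omega)
      · -- inside the block: advance within
        simp only [aLoop, if_pos hdep, if_neg hbr]
        exact ih (dep + 1) (within + 1) (PySem.Set.add res dep) (by omega) (by omega)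
          ⟨b, hb, by omega⟩ (by omega)
    · rw [aLoop_exit num n (f + 1) dep within res (by omega),
        PySem.List.pyRange_one_eq_nil (by omega)]
      rfl

-- The leading [0, n-1) prefix is an even (the 0th) block: rejected by keptB.
lemma filter_head_skip (num n : Int) (hn : 1 ≤ n) :
    (PySem.List.pyRange 0 num 1).filter (fun i => keptB n i)
      = (PySem.List.pyRange (n - 1) num 1).filter (fun i => keptB n i) := by
  have h := filter_skip (fun i => keptB n i) num (n - 1).toNat 0 ?_
  · rwa [show ((0 : Int) + ((n - 1).toNat : Int)) = n - 1 by omega] at h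
  · intro j h1 h2
    have : j = 2 * 0 * n + (j + 1) - 1 := by omega
    rw [this]
    exact keptB_false n 0 (j + 1) (by omega) le_rfl (by omega) (by omega)

-- ===== VERDICT (by name: the statement is the Claim_ definition above) =====
theorem compute_dependencies_spec : Claim_equal_compute_dependencies := by
  intro num_values index result _hdom hpre
  simp only [Spec_compute_dependencies, compute_dependencies, compute_dependencies_alt]
  by_cases hge : 0 ≤ index
  · rw [filter_head_skip num_values (index + 1) (by omega)]
    exact aLoop_eq_update num_values (index + 1) (by omega) _ (index + 1 - 1) 0 _
      le_rfl (by omega) ⟨0, le_rfl, by ring⟩ le_rfl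
  · -- num_values ≤ index < 0: A exits at once and B's range is empty
    have hle : num_values ≤ index := by rcases hpre with h | h <;> omega
    rw [aLoop_exit _ _ _ _ _ _ (by omega), PySem.List.pyRange_one_eq_nil (by omega)]
    rfl
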